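-- pv_equiv track=rewrite | github.com/Leapense/problems | 29378번： Гарри Поттер и нос Волан-де-Морта/Гарри Поттер и нос Волан-де-Морта.py | count_nose_positions
-- ===== SOURCE A (Python) =====
-- def count_nose_positions(n, m, grid):
--     count = 0
--     for i in range(n):
--         for j in range(m):
--             if grid[i][j] == '.':
--                 if j + 1 < m and grid[i][j + 1] == '.':
--                     count += 1
--                 if i + 1 < n and grid[i + 1][j] == '.':
--                     count += 1
--     return count
-- ===== SOURCE B (Python) =====
-- def count_nose_positions(n, m, grid):
--     if n <= 0 or m <= 0:
--         return 0
--     rows = [row[:m] for row in grid[:n]]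
--
--     def _adj(cells):
--         # run-length scan: a maximal run of k consecutive '.' contributes k-1 pairs
--         total, run = 0, 0
--         for c in cells:
--             if c == '.':
--                 run += 1
--             else:
--                 total += max(run - 1, 0)
--                 run = 0
--         return total + max(run - 1, 0)
--
--     total = sum(_adj(row) for row in rows)
--     total += sum(_adj(col) for col in zip(*rows))
--     return total
-- ===== Notes on version B (the rewrite author's own statement) =====
-- stated objective: alternative
-- what changed: A checks both neighbours of every cell in one interleaved per-cell pass; B never compares neighbouring cells at all: it truncates the grid, run-length scans each row and (via zip-transpose) each column, and sums length-1 over every maximal run of '.', since a run of k dots contains exactly k-1 adjacent pairs.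
import Mathlib
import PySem

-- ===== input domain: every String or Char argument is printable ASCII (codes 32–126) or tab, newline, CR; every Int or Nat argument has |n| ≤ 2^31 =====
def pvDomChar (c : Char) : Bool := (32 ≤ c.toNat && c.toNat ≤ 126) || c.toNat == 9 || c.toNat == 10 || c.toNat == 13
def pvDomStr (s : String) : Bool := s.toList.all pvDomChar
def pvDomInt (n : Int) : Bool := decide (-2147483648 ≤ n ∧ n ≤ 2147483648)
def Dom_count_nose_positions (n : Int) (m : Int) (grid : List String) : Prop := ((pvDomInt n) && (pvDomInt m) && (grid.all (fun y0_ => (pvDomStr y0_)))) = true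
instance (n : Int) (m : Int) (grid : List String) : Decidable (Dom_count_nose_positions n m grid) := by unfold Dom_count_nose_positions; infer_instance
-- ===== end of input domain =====

-- B replaces A's interleaved per-cell neighbour checks by a run-length method:
-- truncate the grid, run-length scan each row and each zip-transposed column,
-- and add length-1 for every maximal run of '.'; objective: alternative
-- algorithm, same cost.

-- ===== PORT A =====
def count_nose_positions (n : Int) (m : Int) (grid : List String) : Int :=
  (PySem.List.pyRange 0 n 1).foldl (fun count i =>
    (PySem.List.pyRange 0 m 1).foldl (fun count j =>
      if PySem.List.pyGetD (PySem.List.pyGetD grid i "").toList j ' ' = '.' then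
        let count := if j + 1 < m ∧ PySem.List.pyGetD (PySem.List.pyGetD grid i "").toList (j + 1) ' ' = '.' then count + 1 else count
        if i + 1 < n ∧ PySem.List.pyGetD (PySem.List.pyGetD grid (i + 1) "").toList j ' ' = '.' then count + 1 else count
      else count) count) 0

-- ===== PORT B =====
-- _adj: run-length scan; a maximal run of k consecutive '.' contributes k-1 pairs
def pvAdj (cells : List Char) : Int :=
  let st := cells.foldl (fun (st : Int × Int) c =>
      if c = '.' then (st.1, st.2 + 1) else (st.1 + max (st.2 - 1) 0, (0 : Int)))
    ((0 : Int), (0 : Int))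
  st.1 + max (st.2 - 1) 0

-- port of the library call zip(*rows): columns up to the shortest row's length
-- (exact for Python's zip: it truncates to the minimum length; j is always in range)
def pvZipStar (rows : List (List Char)) : List (List Char) :=
  (List.range (((rows.map List.length).min?).getD 0)).map
    (fun j => rows.map (fun r => r.getD j ' '))

def count_nose_positions_alt (n : Int) (m : Int) (grid : List String) : Int :=
  if n ≤ 0 ∨ m ≤ 0 then 0
  else
    let rows := (PySem.List.slice grid none (some n)).map (fun row => PySem.List.slice row.toList none (some m))
    let total := (rows.map pvAdj).sum
    total + ((pvZipStar rows).map pvAdj).sum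

-- ===== PRECONDITION & SPEC =====
-- Pre_ excludes exactly the inputs where A raises IndexError: 0 < n and 0 < m with
-- the grid having fewer than n rows, or one of the first n rows shorter than m.
def Pre_count_nose_positions (n : Int) (m : Int) (grid : List String) : Prop :=
  n ≤ 0 ∨ m ≤ 0 ∨ (n ≤ (grid.length : Int) ∧ ∀ row ∈ grid.take n.toNat, m ≤ (row.toList.length : Int))
instance (n : Int) (m : Int) (grid : List String) : Decidable (Pre_count_nose_positions n m grid) := by unfold Pre_count_nose_positions; infer_instance

def pvWitness_count_nose_positions : Int × Int × List String := (2, 3, ["..#", ".#."])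

def Spec_count_nose_positions (n : Int) (m : Int) (grid : List String) (out : Int) : Prop := out = count_nose_positions_alt n m grid
instance (n : Int) (m : Int) (grid : List String) (out : Int) : Decidable (Spec_count_nose_positions n m grid out) := by unfold Spec_count_nose_positions; infer_instance

-- ===== CLAIM (what is proved, stated in full; the proofs are below) =====
def Claim_equal_count_nose_positions : Prop := ∀ (n : Int) (m : Int) (grid : List String), Dom_count_nose_positions n m grid → Pre_count_nose_positions n m grid → Spec_count_nose_positions n m grid (count_nose_positions n m grid)

-- ===== LEMMAS AND PROOFS =====

-- recursive adjacent-dot-pair count, the common reference for both proofs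
def pvP : List Char → Int
  | [] => 0
  | [_] => 0
  | a :: b :: t => (if a = '.' ∧ b = '.' then 1 else 0) + pvP (b :: t)

theorem pvP_replicate : ∀ r : Nat, pvP (List.replicate r '.') = max ((r : Int) - 1) 0
  | 0 => by simp [pvP]
  | 1 => by simp [pvP, List.replicate]
  | (r + 2) => by
    have ih := pvP_replicate (r + 1)
    rw [show List.replicate (r + 2) '.' = '.' :: List.replicate (r + 1) '.' from rfl]
    rw [show (List.replicate (r + 1) '.' : List Char) = '.' :: List.replicate r '.' from rfl]
    rw [pvP, show ('.' :: List.replicate r '.' : List Char) = List.replicate (r + 1) '.' from rfl, ih]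
    rw [if_pos ⟨rfl, rfl⟩]
    push_cast
    omega

theorem pvP_cons_ne (c : Char) (L : List Char) (hc : ¬ c = '.') : pvP (c :: L) = pvP L := by
  cases L with
  | nil => simp [pvP]
  | cons b t => rw [pvP, if_neg (fun h => hc h.1)]; ring

theorem pvP_replicate_append_ne (c : Char) (L : List Char) (hc : ¬ c = '.') :
    ∀ r : Nat, pvP (List.replicate r '.' ++ c :: L) = max ((r : Int) - 1) 0 + pvP (c :: L)
  | 0 => by simp
  | 1 => by
    simp only [List.replicate, List.cons_append, List.nil_append]
    rw [pvP, if_neg (fun h => hc h.2)]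
    simp
  | (r + 2) => by
    have ih := pvP_replicate_append_ne c L hc (r + 1)
    rw [show List.replicate (r + 2) '.' ++ c :: L = '.' :: (List.replicate (r + 1) '.' ++ c :: L) from rfl]
    rw [show (List.replicate (r + 1) '.' ++ c :: L : List Char) = '.' :: (List.replicate r '.' ++ c :: L) from rfl]
    rw [pvP, show ('.' :: (List.replicate r '.' ++ c :: L) : List Char) = List.replicate (r + 1) '.' ++ c :: L from rfl, ih]
    rw [if_pos ⟨rfl, rfl⟩]
    push_cast
    omega

theorem pvAdj_loop (f : Int × Int → Char → Int × Int)
    (hf : f = fun (st : Int × Int) c =>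
      if c = '.' then (st.1, st.2 + 1) else (st.1 + max (st.2 - 1) 0, (0 : Int))) :
    ∀ (L : List Char) (t : Int) (r : Nat),
    (L.foldl f (t, (r : Int))).1 + max ((L.foldl f (t, (r : Int))).2 - 1) 0
      = t + pvP (List.replicate r '.' ++ L)
  | [], t, r => by simp [pvP_replicate r]
  | c :: L, t, r => by
    by_cases hc : c = '.'
    · have step : f (t, (r : Int)) c = (t, ((r + 1 : Nat) : Int)) := by
        rw [hf]; simp only [hc]; push_cast; ring_nf
      have ih := pvAdj_loop f hf L t (r + 1)
      rw [List.foldl_cons, step, ih]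
      rw [show List.replicate (r + 1) '.' ++ L = List.replicate r '.' ++ '.' :: L by
        rw [List.replicate_succ']; simp]
      rw [hc]
    · have step : f (t, (r : Int)) c = (t + max ((r : Int) - 1) 0, ((0 : Nat) : Int)) := by
        rw [hf]; simp [hc]
      have ih := pvAdj_loop f hf L (t + max ((r : Int) - 1) 0) 0
      rw [List.foldl_cons, step, ih]
      rw [pvP_replicate_append_ne c L hc r]
      simp only [List.replicate, List.nil_append]
      rw [pvP_cons_ne c L hc]
      ring

theorem pvAdj_eq_P (L : List Char) : pvAdj L = pvP L := by
  unfold pvAdj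
  have h := pvAdj_loop _ rfl L 0 0
  simp only [Nat.cast_zero] at h
  simpa using h

theorem pvP_zip : ∀ L : List Char,
    pvP L = ((L.zip (L.drop 1)).map (fun p => if p.1 = '.' ∧ p.2 = '.' then (1 : Int) else 0)).sum
  | [] => by simp [pvP]
  | [a] => by simp [pvP]
  | a :: b :: t => by
    have ih := pvP_zip (b :: t)
    rw [pvP, ih]
    simp

theorem zip_tail_sum {α : Type} (d : α) (f : α → α → Int) :
    ∀ (r : List α),
    ((r.zip (r.drop 1)).map (fun p => f p.1 p.2)).sum
      = ((List.range r.length).map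
          (fun j => if j + 1 < r.length then f (r.getD j d) (r.getD (j+1) d) else 0)).sum
  | [] => by simp
  | [a] => by simp
  | a :: b :: r => by
    have ih := zip_tail_sum d f (b :: r)
    simp only [List.drop_one, List.tail_cons, List.zip_cons_cons, List.map_cons, List.sum_cons] at *
    rw [ih]
    simp only [List.length_cons, List.range_succ_eq_map, List.map_cons, List.map_map, List.sum_cons]
    simp only [Function.comp_def, Nat.succ_eq_add_one, List.getD_cons_succ, List.getD_cons_zero,
      Nat.add_lt_add_iff_right, Nat.zero_lt_succ, if_true]

-- pvP in indexed range form
theorem pvP_range (d : Char) (L : List Char) :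
    pvP L = ((List.range L.length).map
        (fun j => if j + 1 < L.length ∧ L.getD j d = '.' ∧ L.getD (j+1) d = '.' then (1 : Int) else 0)).sum := by
  rw [pvP_zip L, zip_tail_sum d (fun a b => if a = '.' ∧ b = '.' then (1 : Int) else 0) L]
  refine congrArg List.sum (List.map_congr_left ?_)
  intro j _
  by_cases h : j + 1 < L.length
  · rw [if_pos h]; exact if_congr (by tauto) rfl rfl
  · rw [if_neg h, if_neg (fun hc => h hc.1)]

def Gc (grid : List String) (i j : Nat) : Char := (grid.getD i "").toList.getD j ' '

theorem innerA (n m : Int) (grid : List String) (i : Nat) (count : Int) :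
    List.foldl (fun count j =>
      if PySem.List.pyGetD (PySem.List.pyGetD grid (↑i) "").toList j ' ' = '.' then
        let count := if j + 1 < m ∧ PySem.List.pyGetD (PySem.List.pyGetD grid (↑i) "").toList (j + 1) ' ' = '.' then count + 1 else count
        if (↑i) + 1 < n ∧ PySem.List.pyGetD (PySem.List.pyGetD grid ((↑i) + 1) "").toList j ' ' = '.' then count + 1 else count
      else count) count ((List.range m.toNat).map (fun k => ((k : Nat) : Int)))
    = count + ((List.range m.toNat).map (fun j =>
        (if Gc grid i j = '.' ∧ j+1 < m.toNat ∧ Gc grid i (j+1) = '.' then (1:Int) else 0)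
      + (if Gc grid i j = '.' ∧ i+1 < n.toNat ∧ Gc grid (i+1) j = '.' then (1:Int) else 0))).sum := by
  rw [List.foldl_map]
  rw [PySem.List.foldl_congr_mem _ _
    (fun count j => count +
        ((if Gc grid i j = '.' ∧ j+1 < m.toNat ∧ Gc grid i (j+1) = '.' then (1:Int) else 0)
      + (if Gc grid i j = '.' ∧ i+1 < n.toNat ∧ Gc grid (i+1) j = '.' then (1:Int) else 0))) count ?_]
  · exact PySem.List.foldl_add _ _ _
  · intro acc j hj
    simp only [List.mem_range] at hj
    have hc1 : ((j:Int)) + 1 = ((j+1 : Nat) : Int) := by push_cast; ring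
    have hc2 : ((i:Int)) + 1 = ((i+1 : Nat) : Int) := by push_cast; ring
    simp only [hc1, hc2, PySem.List.pyGetD_natCast]
    have hm : (((j+1 : Nat):Int) < m) ↔ (j + 1 < m.toNat) := by omega
    have hn : (((i+1 : Nat):Int) < n) ↔ (i + 1 < n.toNat) := by omega
    simp only [hm, hn]
    unfold Gc
    by_cases hA : (grid.getD i "").toList.getD j ' ' = '.'
    · by_cases h2 : j + 1 < m.toNat ∧ (grid.getD i "").toList.getD (j+1) ' ' = '.'
      · by_cases h3 : i + 1 < n.toNat ∧ (grid.getD (i+1) "").toList.getD j ' ' = '.'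
        · simp only [if_pos hA, if_pos h2, if_pos h3, if_pos (⟨hA, h2⟩ : _ ∧ _), if_pos (⟨hA, h3⟩ : _ ∧ _)]; ring
        · simp only [if_pos hA, if_pos h2, if_neg h3, if_pos (⟨hA, h2⟩ : _ ∧ _),
            if_neg (fun hc : _ ∧ _ => h3 hc.2)]; ring
      · by_cases h3 : i + 1 < n.toNat ∧ (grid.getD (i+1) "").toList.getD j ' ' = '.'
        · simp only [if_pos hA, if_neg h2, if_pos h3, if_neg (fun hc : _ ∧ _ => h2 hc.2),
            if_pos (⟨hA, h3⟩ : _ ∧ _)]; ring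
        · simp only [if_pos hA, if_neg h2, if_neg h3, if_neg (fun hc : _ ∧ _ => h2 hc.2),
            if_neg (fun hc : _ ∧ _ => h3 hc.2)]; ring
    · simp only [if_neg hA, if_neg (fun hc : _ ∧ _ => hA hc.1)]; ring

theorem A_sum (n m : Int) (grid : List String) :
    count_nose_positions n m grid
    = ((List.range n.toNat).map (fun i =>
        ((List.range m.toNat).map (fun j =>
          (if Gc grid i j = '.' ∧ j+1 < m.toNat ∧ Gc grid i (j+1) = '.' then (1:Int) else 0)
        + (if Gc grid i j = '.' ∧ i+1 < n.toNat ∧ Gc grid (i+1) j = '.' then (1:Int) else 0))).sum)).sum := by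
  unfold count_nose_positions
  rw [PySem.List.pyRange_one 0 n, PySem.List.pyRange_one 0 m]
  simp only [zero_add, Int.sub_zero]
  rw [List.foldl_map]
  rw [PySem.List.foldl_congr_mem _ _
    (fun count i => count +
      ((List.range m.toNat).map (fun j =>
          (if Gc grid i j = '.' ∧ j+1 < m.toNat ∧ Gc grid i (j+1) = '.' then (1:Int) else 0)
        + (if Gc grid i j = '.' ∧ i+1 < n.toNat ∧ Gc grid (i+1) j = '.' then (1:Int) else 0))).sum) 0 ?_]
  · rw [PySem.List.foldl_add]; simp
  · intro acc i hi
    exact innerA n m grid i acc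

theorem sum_map_getD {α : Type} (d : α) (f : α → Int) :
    ∀ l : List α, (l.map f).sum = ((List.range l.length).map (fun i => f (l.getD i d))).sum
  | [] => by simp
  | a :: l => by
    simp only [List.map_cons, List.sum_cons, List.length_cons, List.range_succ_eq_map,
      List.map_map, Function.comp_def, Nat.succ_eq_add_one, List.getD_cons_succ, List.getD_cons_zero]
    rw [sum_map_getD d f l]

theorem rows_len (M : Nat) (grid : List String) (i : Nat) (hi : i < grid.length)
    (hrow : M ≤ (grid.getD i "").toList.length) :
    ((grid.map (fun row => row.toList.take M)).getD i []).length = M := by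
  rw [List.getD_eq_getElem _ _ (by simp [hi]), List.getElem_map]
  rw [List.getD_eq_getElem _ _ hi] at hrow
  simp only [List.length_take, String.length_toList] at hrow ⊢
  omega

theorem rows_get (M : Nat) (grid : List String) (i j : Nat) (hi : i < grid.length) (hj : j < M) :
    ((grid.map (fun row => row.toList.take M)).getD i []).getD j ' ' = Gc grid i j := by
  rw [List.getD_eq_getElem (grid.map (fun row => row.toList.take M)) [] (by simp [hi]),
    List.getElem_map]
  unfold Gc
  rw [List.getD_eq_getElem?_getD, List.getD_eq_getElem?_getD,
    List.getD_eq_getElem _ _ hi]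
  rcases Nat.lt_or_ge j grid[i].toList.length with h | h
  · rw [List.getElem?_eq_getElem (by simp only [List.length_take, String.length_toList] at h ⊢; omega),
      List.getElem?_eq_getElem h, List.getElem_take]
  · rw [List.getElem?_eq_none (by simp only [List.length_take, String.length_toList] at h ⊢; omega),
      List.getElem?_eq_none (by omega)]

theorem Gc_take (grid : List String) (N i j : Nat) (hi : i < N) (hiN : i < grid.length) :
    Gc (grid.take N) i j = Gc grid i j := by
  unfold Gc
  rw [List.getD_eq_getElem (grid.take N) "" (by simp [List.length_take]; omega),
    List.getD_eq_getElem grid "" hiN, List.getElem_take]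

theorem min_replicate : ∀ (k : Nat) (a : Nat), (List.replicate (k+1) a).min? = some a
  | 0, a => by simp [List.min?]
  | (k+1), a => by
    have ih := min_replicate k a
    simp only [List.replicate, List.min?] at ih ⊢
    cases k with
    | zero => simp [min_self]
    | succ k' =>
      simp only [List.foldl_cons, min_self] at ih ⊢
      exact ih

theorem getD_map_lt {α β : Type} (f : α → β) (l : List α) (i : Nat) (hi : i < l.length)
    (d : β) (d' : α) : (l.map f).getD i d = f (l.getD i d') := by
  rw [List.getD_eq_getElem _ _ (by simp [hi]), List.getElem_map, List.getD_eq_getElem _ _ hi]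

theorem sum_swap_range (g : Nat → Nat → Int) (M : Nat) :
    ∀ (N : Nat),
    ((List.range N).map (fun i => ((List.range M).map (g i)).sum)).sum
      = ((List.range M).map (fun j => ((List.range N).map (fun i => g i j)).sum)).sum
  | 0 => by simp
  | (N+1) => by
    have ih := sum_swap_range g M N
    rw [List.range_succ, List.map_append, List.sum_append, ih]
    simp only [List.map_append, List.map_cons, List.map_nil, List.sum_append, List.sum_cons,
      List.sum_nil, add_zero]
    exact (PySem.List.sum_map_add_int _ _ _).symm

theorem B_sum (n m : Int) (grid : List String) (hn : 0 < n) (hm : 0 < m)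
    (hlen : n ≤ (grid.length : Int))
    (hrow : ∀ row ∈ grid.take n.toNat, m ≤ (row.toList.length : Int)) :
    count_nose_positions_alt n m grid
    = ((List.range n.toNat).map (fun i =>
        ((List.range m.toNat).map (fun j =>
          if Gc grid i j = '.' ∧ j+1 < m.toNat ∧ Gc grid i (j+1) = '.' then (1:Int) else 0)).sum)).sum
    + ((List.range n.toNat).map (fun i =>
        ((List.range m.toNat).map (fun j =>
          if Gc grid i j = '.' ∧ i+1 < n.toNat ∧ Gc grid (i+1) j = '.' then (1:Int) else 0)).sum)).sum := by
  unfold count_nose_positions_alt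
  rw [if_neg (by omega)]
  rw [PySem.List.slice_to grid (le_of_lt hn)]
  simp only [PySem.List.slice_to _ (le_of_lt hm)]
  set R := (grid.take n.toNat).map (fun row => row.toList.take m.toNat) with hR
  have htklen : (grid.take n.toNat).length = n.toNat := by
    rw [List.length_take]; omega
  have hRlen : R.length = n.toNat := by rw [hR, List.length_map, htklen]
  have hrlen : ∀ i < n.toNat, (R.getD i []).length = m.toNat := by
    intro i hi
    refine rows_len m.toNat (grid.take n.toNat) i (by omega) ?_
    have hmem : (grid.take n.toNat).getD i "" ∈ grid.take n.toNat := by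
      rw [List.getD_eq_getElem _ _ (by omega)]; exact List.getElem_mem _
    have h1 := hrow _ hmem
    have h2 : ((grid.take n.toNat).getD i "").toList.length
        = ((grid.take n.toNat).getD i "").length := String.length_toList
    omega
  have hget : ∀ i < n.toNat, ∀ j < m.toNat, (R.getD i []).getD j ' ' = Gc grid i j := by
    intro i hi j hj
    rw [hR, rows_get m.toNat (grid.take n.toNat) i j (by omega) hj,
      Gc_take grid n.toNat i j hi (by omega)]
  -- every row of R has length m.toNat
  have hmemlen : ∀ r ∈ R, r.length = m.toNat := by
    intro r hr
    rw [hR] at hr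
    rcases List.mem_map.mp hr with ⟨row, hrow', rfl⟩
    have := hrow row hrow'
    simp only [List.length_take]
    omega
  -- horizontal part
  have hhoriz : (R.map pvAdj).sum
      = ((List.range n.toNat).map (fun i =>
          ((List.range m.toNat).map (fun j =>
            if Gc grid i j = '.' ∧ j+1 < m.toNat ∧ Gc grid i (j+1) = '.' then (1:Int) else 0)).sum)).sum := by
    rw [sum_map_getD ([] : List Char), hRlen]
    refine congrArg List.sum (List.map_congr_left ?_)
    intro i hi
    simp only [List.mem_range] at hi
    rw [pvAdj_eq_P, pvP_range ' ', hrlen i hi]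
    refine congrArg List.sum (List.map_congr_left ?_)
    intro j hj
    simp only [List.mem_range] at hj
    by_cases hj1 : j + 1 < m.toNat
    · rw [hget i hi j hj, hget i hi (j+1) hj1]
      exact if_congr (by tauto) rfl rfl
    · rw [if_neg (fun hc => hj1 hc.1), if_neg (fun hc => hj1 hc.2.1)]
  -- vertical part
  have hmaplen : R.map List.length = List.replicate n.toNat m.toNat := by
    refine List.eq_replicate_iff.mpr ⟨by simp [hRlen], ?_⟩
    intro b hb
    rcases List.mem_map.mp hb with ⟨r, hrmem, rfl⟩
    exact hmemlen r hrmem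
  have hk : ((R.map List.length).min?).getD 0 = m.toNat := by
    have hn1 : ∃ k, n.toNat = k + 1 := ⟨n.toNat - 1, by omega⟩
    rcases hn1 with ⟨k, hk'⟩
    rw [hmaplen, hk', min_replicate]
    rfl
  have hvert : ((pvZipStar R).map pvAdj).sum
      = ((List.range n.toNat).map (fun i =>
          ((List.range m.toNat).map (fun j =>
            if Gc grid i j = '.' ∧ i+1 < n.toNat ∧ Gc grid (i+1) j = '.' then (1:Int) else 0)).sum)).sum := by
    unfold pvZipStar
    rw [hk, List.map_map]
    rw [sum_swap_range (fun i j =>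
      if Gc grid i j = '.' ∧ i+1 < n.toNat ∧ Gc grid (i+1) j = '.' then (1:Int) else 0) m.toNat n.toNat]
    refine congrArg List.sum (List.map_congr_left ?_)
    intro j hj
    simp only [List.mem_range, Function.comp_def] at hj ⊢
    rw [pvAdj_eq_P, pvP_range ' ', List.length_map, hRlen]
    refine congrArg List.sum (List.map_congr_left ?_)
    intro i hi
    simp only [List.mem_range] at hi
    by_cases hi1 : i + 1 < n.toNat
    · rw [getD_map_lt _ R i (by omega) ' ' [], getD_map_lt _ R (i+1) (by omega) ' ' [],
        hget i hi j hj, hget (i+1) hi1 j hj]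
      exact if_congr (by tauto) rfl rfl
    · rw [if_neg (fun hc => hi1 hc.1), if_neg (fun hc => hi1 hc.2.1)]
  rw [hhoriz, hvert]

theorem foldl_keep {α : Type} : ∀ (l : List α) (c : Int), List.foldl (fun c (_ : α) => c) c l = c
  | [], _ => rfl
  | _ :: l, c => foldl_keep l c

theorem main_eq (n m : Int) (grid : List String)
    (hpre : Pre_count_nose_positions n m grid) :
    count_nose_positions n m grid = count_nose_positions_alt n m grid := by
  by_cases hn : n ≤ 0
  · unfold count_nose_positions count_nose_positions_alt
    rw [PySem.List.pyRange_one_eq_nil (a := 0) (b := n) (by omega), if_pos (Or.inl hn)]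
    simp
  · by_cases hm : m ≤ 0
    · unfold count_nose_positions count_nose_positions_alt
      rw [if_pos (Or.inr hm), PySem.List.pyRange_one_eq_nil (a := 0) (b := m) (by omega)]
      simp only [List.foldl_nil, foldl_keep]
    · have h3 : n ≤ (grid.length : Int) ∧ ∀ row ∈ grid.take n.toNat, m ≤ (row.toList.length : Int) := by
        rcases hpre with h | h | h
        · omega
        · omega
        · exact h
      rw [A_sum, B_sum n m grid (by omega) (by omega) h3.1 h3.2]
      calc ((List.range n.toNat).map (fun i =>
              ((List.range m.toNat).map (fun j =>
                (if Gc grid i j = '.' ∧ j+1 < m.toNat ∧ Gc grid i (j+1) = '.' then (1:Int) else 0)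
              + (if Gc grid i j = '.' ∧ i+1 < n.toNat ∧ Gc grid (i+1) j = '.' then (1:Int) else 0))).sum)).sum
          = ((List.range n.toNat).map (fun i =>
              ((List.range m.toNat).map (fun j =>
                if Gc grid i j = '.' ∧ j+1 < m.toNat ∧ Gc grid i (j+1) = '.' then (1:Int) else 0)).sum
            + ((List.range m.toNat).map (fun j =>
                if Gc grid i j = '.' ∧ i+1 < n.toNat ∧ Gc grid (i+1) j = '.' then (1:Int) else 0)).sum)).sum := by
            refine congrArg List.sum (List.map_congr_left ?_)
            intro i _
            exact PySem.List.sum_map_add_int _ _ _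
        _ = _ := PySem.List.sum_map_add_int _ _ _

-- ===== VERDICT (by name: the statement is the Claim_ definition above) =====
theorem count_nose_positions_spec : Claim_equal_count_nose_positions := by
  intro n m grid _ hpre
  unfold Spec_count_nose_positions
  exact main_eq n m grid hpre
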